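-- pv_equiv track=rewrite | github.com/rahulvijay04/graphguide | Models/CMF/src/.ipynb_checkpoints/evaluator-checkpoint.py | compute_normalized_ranks
-- ===== SOURCE A (Python) =====
-- def compute_normalized_ranks(train, test, recommended):
--     train = train.copy()
--     test = test.copy()
--     recommended = recommended.copy()
--
--     # Remove train items from recommended
--     # Items seen in train will not be recommended to users
--     for item in train:
--         if item in recommended:
--             recommended.remove(item)
--
--     ranks = []
--
--     # Iterate through all test items
--     for item in test:
--         try:
--             rank = recommended.index(item) + 1  # Indices start with 0, ranks with 1
--         except ValueError:
--             # Item was not seen in train set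
--             rank = None
--         else:
--             recommended.remove(item)
--         finally:
--             ranks.append(rank)
--     return ranks
-- ===== SOURCE B (Python) =====
-- def compute_normalized_ranks(train, test, recommended):
--     # One pass builds per-value position lists; removals advance a per-value
--     # pointer and deactivate the original position, so no list is ever scanned
--     # with .index/.remove.
--     pos = {}
--     for i, v in enumerate(recommended):
--         pos.setdefault(v, []).append(i)
--     ptr = {}
--     active = [True] * len(recommended)
--     for item in train:
--         k = ptr.get(item, 0)
--         lst = pos.get(item, [])
--         if k < len(lst):
--             active[lst[k]] = False
--             ptr[item] = k + 1
--     ranks = []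
--     for item in test:
--         k = ptr.get(item, 0)
--         lst = pos.get(item, [])
--         if k < len(lst):
--             p = lst[k]
--             ranks.append(sum(active[:p]) + 1)
--             active[p] = False
--             ptr[item] = k + 1
--         else:
--             ranks.append(None)
--     return ranks
-- ===== Notes on version B (the rewrite author's own statement) =====
-- stated objective: faster
-- what changed: Replaces A's repeated .index/.remove scans of the shrinking recommendation list by a one-pass index of per-value position lists plus a per-value pointer and a boolean activity mask, so each removal is O(1) and only rank queries scan a prefix.
import Mathlib
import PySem

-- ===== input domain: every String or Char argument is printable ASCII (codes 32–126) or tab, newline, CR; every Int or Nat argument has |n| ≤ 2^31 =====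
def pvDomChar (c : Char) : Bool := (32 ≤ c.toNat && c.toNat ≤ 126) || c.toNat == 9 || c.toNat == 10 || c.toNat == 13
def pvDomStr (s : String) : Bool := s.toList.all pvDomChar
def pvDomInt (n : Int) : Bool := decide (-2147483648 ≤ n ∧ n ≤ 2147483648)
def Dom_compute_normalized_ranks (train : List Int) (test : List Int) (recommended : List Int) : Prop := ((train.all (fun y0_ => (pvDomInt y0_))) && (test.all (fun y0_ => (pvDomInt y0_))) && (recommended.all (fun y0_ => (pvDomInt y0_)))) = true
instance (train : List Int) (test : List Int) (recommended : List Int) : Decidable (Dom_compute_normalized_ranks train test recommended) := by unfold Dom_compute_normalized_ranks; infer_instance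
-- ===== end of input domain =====

-- B replaces A's repeated list .index/.remove scans by per-value position lists,
-- a per-value pointer and an activity mask (objective: a different, faster-in-practice algorithm).


-- ===== PORT A =====
-- for item in train: if item in recommended: recommended.remove(item)
def pvA_trainStep (rec : List Int) (item : Int) : List Int :=
  if item ∈ rec then (PySem.List.remove? rec item).getD rec else rec

-- try: rank = recommended.index(item)+1 / except ValueError: rank = None / else: recommended.remove(item) / finally: ranks.append(rank)
def pvA_testStep (st : List (Option Int) × List Int) (item : Int) : List (Option Int) × List Int :=
  match PySem.List.index? st.2 item with
  | some i => (st.1 ++ [some ((i : Int) + 1)], (PySem.List.remove? st.2 item).getD st.2)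
  | none => (st.1 ++ [none], st.2)

def compute_normalized_ranks (train : List Int) (test : List Int) (recommended : List Int) : List (Option Int) :=
  let rec1 := train.foldl pvA_trainStep recommended
  (test.foldl pvA_testStep ([], rec1)).1

-- ===== PORT B =====
-- pos = {}; for i, v in enumerate(recommended): pos.setdefault(v, []).append(i)
-- (indices are stored as Nat; they are exactly the nonnegative ints produced by enumerate)
def pvB_pos (recommended : List Int) : PySem.Dict Int (List Nat) :=
  recommended.zipIdx.foldl (fun d p => d.modify p.1 [] (· ++ [p.2])) PySem.Dict.empty

-- for item in train: k = ptr.get(item,0); lst = pos.get(item,[]); if k < len(lst): active[lst[k]] = False; ptr[item] = k+1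
def pvB_trainStep (pos : PySem.Dict Int (List Nat)) (s : PySem.Dict Int Nat × List Bool) (item : Int) :
    PySem.Dict Int Nat × List Bool :=
  let k := s.1.getD item 0
  let lst := pos.getD item []
  if h : k < lst.length then (s.1.insert item (k + 1), s.2.set lst[k] false) else s

-- for item in test: … p = lst[k]; ranks.append(sum(active[:p]) + 1); active[p] = False; ptr[item] = k+1 … else ranks.append(None)
def pvB_testStep (pos : PySem.Dict Int (List Nat))
    (s : List (Option Int) × PySem.Dict Int Nat × List Bool) (item : Int) :
    List (Option Int) × PySem.Dict Int Nat × List Bool :=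
  let k := s.2.1.getD item 0
  let lst := pos.getD item []
  if h : k < lst.length then
    let p := lst[k]
    (s.1 ++ [some (((s.2.2.take p).count true : Int) + 1)], s.2.1.insert item (k + 1), s.2.2.set p false)
  else (s.1 ++ [none], s.2)

def compute_normalized_ranks_alt (train : List Int) (test : List Int) (recommended : List Int) : List (Option Int) :=
  let pos := pvB_pos recommended
  let s1 := train.foldl (pvB_trainStep pos) (PySem.Dict.empty, List.replicate recommended.length true)
  (test.foldl (pvB_testStep pos) ([], s1)).1

-- ===== PRECONDITION & SPEC =====
def Spec_compute_normalized_ranks (train : List Int) (test : List Int) (recommended : List Int) (out : List (Option Int)) : Prop := out = compute_normalized_ranks_alt train test recommended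
instance (train : List Int) (test : List Int) (recommended : List Int) (out : List (Option Int)) : Decidable (Spec_compute_normalized_ranks train test recommended out) := by unfold Spec_compute_normalized_ranks; infer_instance

-- ===== CLAIM (what is proved, stated in full; the proofs are below) =====
def Claim_equal_compute_normalized_ranks : Prop := ∀ (train : List Int) (test : List Int) (recommended : List Int), Dom_compute_normalized_ranks train test recommended → Spec_compute_normalized_ranks train test recommended (compute_normalized_ranks train test recommended)

-- ===== LEMMAS AND PROOFS =====

-- the activity mask as a function on positions
def pvFA (act : List Bool) : Nat → Bool := fun i => act.getD i false

-- the sublist of R at active positions (positions counted from s)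
def pvFilt (f : Nat → Bool) : List Int → Nat → List Int
  | [], _ => []
  | a :: R, s => if f s then a :: pvFilt f R (s + 1) else pvFilt f R (s + 1)

-- first active position holding value v
def pvHit (f : Nat → Bool) : List Int → Nat → Int → Option Nat
  | [], _, _ => none
  | a :: R, s, v => if a = v ∧ f s then some s else pvHit f R (s + 1) v

-- all positions holding value v, in order
def pvOcc : List Int → Nat → Int → List Nat
  | [], _, _ => []
  | a :: R, s, v => if a = v then s :: pvOcc R (s + 1) v else pvOcc R (s + 1) v

def pvUpd (f : Nat → Bool) (p : Nat) : Nat → Bool := fun i => if i = p then false else f i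

def pvInv (R : List Int) (ptr : PySem.Dict Int Nat) (act : List Bool) : Prop :=
  act.length = R.length ∧
  ∀ v : Int, ptr.getD v 0 ≤ (pvOcc R 0 v).length ∧
    ∀ j (hj : j < (pvOcc R 0 v).length), act.getD (pvOcc R 0 v)[j] false = decide (ptr.getD v 0 ≤ j)

theorem pvFilt_congr (f g : Nat → Bool) (R : List Int) (s : Nat)
    (h : ∀ i, s ≤ i → f i = g i) : pvFilt f R s = pvFilt g R s := by
  induction R generalizing s with
  | nil => rfl
  | cons a R ih =>
    simp only [pvFilt, h s le_rfl, ih (s + 1) (fun i hi => h i (by omega))]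

theorem pvFilt_all (f : Nat → Bool) (R : List Int) (s : Nat)
    (h : ∀ i, s ≤ i → i < s + R.length → f i = true) : pvFilt f R s = R := by
  induction R generalizing s with
  | nil => rfl
  | cons a R ih =>
    simp only [pvFilt, h s le_rfl (by simp), if_true,
      ih (s + 1) (fun i h1 h2 => h i (by omega) (by simp; omega))]

theorem pvHit_none (f : Nat → Bool) (R : List Int) (s : Nat) (v : Int)
    (h : pvHit f R s v = none) : v ∉ pvFilt f R s := by
  induction R generalizing s with
  | nil => simp [pvFilt]
  | cons a R ih =>
    simp only [pvHit] at h
    split at h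
    · exact absurd h (by simp)
    · rename_i hc
      simp only [pvFilt]
      by_cases hf : f s
      · have hav : a ≠ v := fun he => hc ⟨he, hf⟩
        simp only [hf, if_true, List.mem_cons]
        rintro (rfl | hm)
        · exact hav rfl
        · exact ih (s + 1) h hm
      · simpa [hf] using ih (s + 1) h

theorem pvHit_spec (f : Nat → Bool) (R : List Int) (s : Nat) (v : Int) (p : Nat)
    (h : pvHit f R s v = some p) :
    s ≤ p ∧
    PySem.List.index? (pvFilt f R s) v = some ((List.range' s (p - s)).countP f) ∧
    PySem.List.remove? (pvFilt f R s) v = some (pvFilt (pvUpd f p) R s) := by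
  induction R generalizing s with
  | nil => simp [pvHit] at h
  | cons a R ih =>
    simp only [pvHit] at h
    split at h
    · rename_i hc
      obtain ⟨rfl, hf⟩ := hc
      have hp : p = s := by simpa using h.symm
      subst hp
      refine ⟨le_rfl, ?_, ?_⟩
      · simp only [pvFilt, if_pos hf]
        rw [PySem.List.index?_cons_self]
        simp
      · simp only [pvFilt, if_pos hf, PySem.List.remove?_cons_self]
        rw [pvFilt_congr (pvUpd f p) f R (p + 1) (fun i hi => by simp [pvUpd]; omega)]
        simp [pvUpd]
    · rename_i hc
      obtain ⟨hsp, hidx, hrem⟩ := ih (s + 1) h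
      have hps : p ≠ s := by omega
      have hr : p - s = (p - (s + 1)) + 1 := by omega
      refine ⟨by omega, ?_, ?_⟩ <;> by_cases hf : f s
      · have hav : a ≠ v := fun he => hc ⟨he, hf⟩
        simp only [pvFilt, if_pos hf]
        rw [PySem.List.index?_cons_of_ne _ hav, hidx, hr, List.range'_succ, List.countP_cons]
        simp [hf]
      · simp only [pvFilt, if_neg hf]
        rw [hidx, hr, List.range'_succ, List.countP_cons]
        simp [hf]
      · have hav : a ≠ v := fun he => hc ⟨he, hf⟩
        have hups : pvUpd f p s = true := by simp [pvUpd, hf]; omega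
        simp only [pvFilt, if_pos hf]
        rw [PySem.List.remove?_cons_of_ne _ hav, hrem]
        simp [pvFilt, hups]
      · have hups : pvUpd f p s = false := by simp [pvUpd, hf]
        simp only [pvFilt, if_neg hf]
        rw [hrem]
        simp [pvFilt, hups]

theorem pvHit_eq_find (f : Nat → Bool) (R : List Int) (s : Nat) (v : Int) :
    pvHit f R s v = (pvOcc R s v).find? f := by
  induction R generalizing s with
  | nil => rfl
  | cons a R ih =>
    by_cases hav : a = v
    · by_cases hf : f s
      · simp [pvHit, pvOcc, hav, hf, List.find?]
      · simp [pvHit, pvOcc, hav, hf, List.find?, ih (s + 1)]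
    · simp [pvHit, pvOcc, hav, ih (s + 1)]

theorem pvOcc_lb (R : List Int) (s : Nat) (v : Int) : ∀ i ∈ pvOcc R s v, s ≤ i := by
  induction R generalizing s with
  | nil => simp [pvOcc]
  | cons a R ih =>
    intro i hi
    simp only [pvOcc] at hi
    split at hi
    · rcases List.mem_cons.mp hi with rfl | hm
      · exact le_rfl
      · have := ih (s + 1) i hm; omega
    · have := ih (s + 1) i hi; omega

theorem pvOcc_ub (R : List Int) (s : Nat) (v : Int) : ∀ i ∈ pvOcc R s v, i < s + R.length := by
  induction R generalizing s with
  | nil => simp [pvOcc]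
  | cons a R ih =>
    intro i hi
    simp only [pvOcc] at hi
    split at hi
    · rcases List.mem_cons.mp hi with rfl | hm
      · simp
      · have := ih (s + 1) i hm; simp; omega
    · have := ih (s + 1) i hi; simp; omega

theorem pvOcc_disj (R : List Int) (s : Nat) (v w : Int) (i : Nat)
    (hv : i ∈ pvOcc R s v) (hw : i ∈ pvOcc R s w) : v = w := by
  induction R generalizing s with
  | nil => simp [pvOcc] at hv
  | cons a R ih =>
    simp only [pvOcc] at hv hw
    by_cases hav : a = v <;> by_cases haw : a = w
    · omega
    · rw [if_pos hav] at hv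
      rw [if_neg haw] at hw
      rcases List.mem_cons.mp hv with rfl | hm
      · have := pvOcc_lb R _ w i hw; omega
      · exact ih (s + 1) hm hw
    · rw [if_neg hav] at hv
      rw [if_pos haw] at hw
      rcases List.mem_cons.mp hw with rfl | hm
      · have := pvOcc_lb R _ v i hv; omega
      · exact ih (s + 1) hv hm
    · rw [if_neg hav] at hv
      rw [if_neg haw] at hw
      exact ih (s + 1) hv hw

theorem pvOcc_pairwise (R : List Int) (s : Nat) (v : Int) :
    (pvOcc R s v).Pairwise (· < ·) := by
  induction R generalizing s with
  | nil => simp [pvOcc]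
  | cons a R ih =>
    simp only [pvOcc]
    split
    · exact List.Pairwise.cons (fun i hi => by have := pvOcc_lb R (s + 1) v i hi; omega) (ih (s + 1))
    · exact ih (s + 1)

theorem pvOcc_nodup (R : List Int) (s : Nat) (v : Int) : (pvOcc R s v).Nodup :=
  (pvOcc_pairwise R s v).imp (fun h => Nat.ne_of_lt h)

theorem pv_find_ramp (L : List Nat) (k : Nat) (f : Nat → Bool)
    (h : ∀ j (hj : j < L.length), f L[j] = decide (k ≤ j)) : L.find? f = L[k]? := by
  induction L generalizing k with
  | nil => simp
  | cons a L ih =>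
    cases k with
    | zero =>
      have ha : f a = true := by simpa using h 0 (by simp)
      simp [List.find?, ha]
    | succ k =>
      have ha : f a = false := by simpa using h 0 (by simp)
      simp only [List.find?, ha, List.getElem?_cons_succ]
      exact ih k (fun j hj => by simpa using h (j + 1) (by simpa))

theorem pv_count_take (act : List Bool) (p : Nat) (hp : p ≤ act.length) :
    (act.take p).count true = (List.range' 0 p).countP (pvFA act) := by
  induction p with
  | zero => simp
  | succ q ih =>
    have hq : q < act.length := by omega
    rw [List.take_succ, List.range'_1_concat, List.count_append, List.countP_append,
      ih (by omega), List.getElem?_eq_getElem hq]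
    simp [pvFA, List.getD_eq_getElem?_getD, List.getElem?_eq_getElem hq, List.count_singleton]

theorem pv_zip_occ (R : List Int) (s : Nat) (v : Int) :
    ((R.zipIdx s).filter (fun p => p.1 == v)).map (·.2) = pvOcc R s v := by
  induction R generalizing s with
  | nil => rfl
  | cons a R ih =>
    by_cases hav : a = v <;> simp [pvOcc, List.zipIdx_cons, hav, ih (s + 1)]

theorem pvB_pos_getD (R : List Int) (v : Int) : (pvB_pos R).getD v [] = pvOcc R 0 v := by
  unfold pvB_pos
  rw [PySem.Dict.getD_foldl_modify_append]
  simp [PySem.Dict.getD_empty, pv_zip_occ]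

theorem pv_getD_set_self (act : List Bool) (p : Nat) (b d : Bool) (h : p < act.length) :
    (act.set p b).getD p d = b := by
  simp [List.getD_eq_getElem?_getD, List.getElem?_set, h]

theorem pv_getD_set_ne (act : List Bool) (p i : Nat) (b d : Bool) (h : i ≠ p) :
    (act.set p b).getD i d = act.getD i d := by
  simp [List.getD_eq_getElem?_getD, List.getElem?_set, Ne.symm h]

theorem pvFA_set (act : List Bool) (p : Nat) (h : p < act.length) :
    pvFA (act.set p false) = pvUpd (pvFA act) p := by
  funext i
  simp only [pvFA, pvUpd]
  by_cases hip : i = p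
  · subst hip
    rw [pv_getD_set_self act i false false h]
    simp
  · rw [pv_getD_set_ne act p i false false hip, if_neg hip]

theorem pv_hit_of_inv (R : List Int) (ptr : PySem.Dict Int Nat) (act : List Bool)
    (hInv : pvInv R ptr act) (v : Int) :
    pvHit (pvFA act) R 0 v = (pvOcc R 0 v)[ptr.getD v 0]? := by
  rw [pvHit_eq_find]
  exact pv_find_ramp _ (ptr.getD v 0) _ (fun j hj => (hInv.2 v).2 j hj)

theorem pv_inv_step (R : List Int) (ptr : PySem.Dict Int Nat) (act : List Bool)
    (hInv : pvInv R ptr act) (v : Int) (h : ptr.getD v 0 < (pvOcc R 0 v).length) :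
    pvInv R (ptr.insert v (ptr.getD v 0 + 1)) (act.set (pvOcc R 0 v)[ptr.getD v 0] false) := by
  obtain ⟨hlen, hinv⟩ := hInv
  have hplt : (pvOcc R 0 v)[ptr.getD v 0] < act.length := by
    rw [hlen]
    simpa using pvOcc_ub R 0 v _ (List.getElem_mem h)
  refine ⟨by simpa using hlen, ?_⟩
  intro w
  by_cases hwv : w = v
  · subst hwv
    rw [PySem.Dict.getD_insert_self]
    refine ⟨by omega, ?_⟩
    intro j hj
    by_cases hjk : j = ptr.getD w 0
    · subst hjk
      rw [pv_getD_set_self _ _ _ _ hplt]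
      simp
    · have hne : (pvOcc R 0 w)[j] ≠ (pvOcc R 0 w)[ptr.getD w 0] := by
        intro he
        exact hjk ((List.Nodup.getElem_inj_iff (pvOcc_nodup R 0 w)).mp he)
      rw [pv_getD_set_ne _ _ _ _ _ hne, (hinv w).2 j hj]
      have : (ptr.getD w 0 ≤ j) ↔ (ptr.getD w 0 + 1 ≤ j) := by omega
      simp [this]
  · rw [PySem.Dict.getD_insert_of_ne ptr _ _ hwv]
    refine ⟨(hinv w).1, ?_⟩
    intro j hj
    have hne : (pvOcc R 0 w)[j] ≠ (pvOcc R 0 v)[ptr.getD v 0] := by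
      intro he
      exact hwv (pvOcc_disj R 0 w v _ (he ▸ List.getElem_mem hj) (List.getElem_mem h))
    rw [pv_getD_set_ne _ _ _ _ _ hne]
    exact (hinv w).2 j hj

theorem pv_train_sim (R : List Int) : ∀ (items : List Int) (ptr : PySem.Dict Int Nat) (act : List Bool),
    pvInv R ptr act →
    items.foldl pvA_trainStep (pvFilt (pvFA act) R 0)
        = pvFilt (pvFA (items.foldl (pvB_trainStep (pvB_pos R)) (ptr, act)).2) R 0 ∧
    pvInv R (items.foldl (pvB_trainStep (pvB_pos R)) (ptr, act)).1
            (items.foldl (pvB_trainStep (pvB_pos R)) (ptr, act)).2 := by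
  intro items
  induction items with
  | nil => intro ptr act hInv; exact ⟨rfl, hInv⟩
  | cons v items ih =>
    intro ptr act hInv
    simp only [List.foldl_cons]
    have hhit := pv_hit_of_inv R ptr act hInv v
    by_cases h : ptr.getD v 0 < (pvOcc R 0 v).length
    · have hsome : pvHit (pvFA act) R 0 v = some (pvOcc R 0 v)[ptr.getD v 0] := by
        rw [hhit, List.getElem?_eq_getElem h]
      obtain ⟨_, hidx, hrem⟩ := pvHit_spec _ _ _ _ _ hsome
      have hmem : v ∈ pvFilt (pvFA act) R 0 := by
        rw [← PySem.List.index?_isSome_iff, hidx]; rfl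
      have hplt : (pvOcc R 0 v)[ptr.getD v 0] < act.length := by
        rw [hInv.1]
        simpa using pvOcc_ub R 0 v _ (List.getElem_mem h)
      have hA : pvA_trainStep (pvFilt (pvFA act) R 0) v
          = pvFilt (pvFA (act.set (pvOcc R 0 v)[ptr.getD v 0] false)) R 0 := by
        rw [pvA_trainStep, if_pos hmem, hrem, Option.getD_some, pvFA_set _ _ hplt]
      have hB : pvB_trainStep (pvB_pos R) (ptr, act) v
          = (ptr.insert v (ptr.getD v 0 + 1), act.set (pvOcc R 0 v)[ptr.getD v 0] false) := by
        rw [pvB_trainStep]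
        simp only [pvB_pos_getD]
        rw [dif_pos h]
      rw [hA, hB]
      exact ih _ _ (pv_inv_step R ptr act hInv v h)
    · have hnone : pvHit (pvFA act) R 0 v = none := by
        rw [hhit, List.getElem?_eq_none (by omega)]
      have hA : pvA_trainStep (pvFilt (pvFA act) R 0) v = pvFilt (pvFA act) R 0 := by
        rw [pvA_trainStep, if_neg (pvHit_none _ _ _ _ hnone)]
      have hB : pvB_trainStep (pvB_pos R) (ptr, act) v = (ptr, act) := by
        rw [pvB_trainStep]
        simp only [pvB_pos_getD]
        rw [dif_neg h]
      rw [hA, hB]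
      exact ih _ _ hInv

theorem pv_test_sim (R : List Int) : ∀ (items : List Int) (ranks : List (Option Int)) (ptr : PySem.Dict Int Nat) (act : List Bool),
    pvInv R ptr act →
    items.foldl pvA_testStep (ranks, pvFilt (pvFA act) R 0)
        = ((items.foldl (pvB_testStep (pvB_pos R)) (ranks, ptr, act)).1,
           pvFilt (pvFA (items.foldl (pvB_testStep (pvB_pos R)) (ranks, ptr, act)).2.2) R 0) := by
  intro items
  induction items with
  | nil => intro ranks ptr act hInv; rfl
  | cons v items ih =>
    intro ranks ptr act hInv
    simp only [List.foldl_cons]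
    have hhit := pv_hit_of_inv R ptr act hInv v
    by_cases h : ptr.getD v 0 < (pvOcc R 0 v).length
    · have hsome : pvHit (pvFA act) R 0 v = some (pvOcc R 0 v)[ptr.getD v 0] := by
        rw [hhit, List.getElem?_eq_getElem h]
      obtain ⟨_, hidx, hrem⟩ := pvHit_spec _ _ _ _ _ hsome
      have hplt : (pvOcc R 0 v)[ptr.getD v 0] < act.length := by
        rw [hInv.1]
        simpa using pvOcc_ub R 0 v _ (List.getElem_mem h)
      have hcnt : ((List.range' 0 ((pvOcc R 0 v)[ptr.getD v 0] - 0)).countP (pvFA act))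
          = (act.take (pvOcc R 0 v)[ptr.getD v 0]).count true := by
        rw [Nat.sub_zero, pv_count_take act _ (by omega)]
      have hA : pvA_testStep (ranks, pvFilt (pvFA act) R 0) v
          = (ranks ++ [some (((act.take (pvOcc R 0 v)[ptr.getD v 0]).count true : Int) + 1)],
             pvFilt (pvFA (act.set (pvOcc R 0 v)[ptr.getD v 0] false)) R 0) := by
        rw [pvA_testStep]
        simp only [hidx, hrem, Option.getD_some, hcnt, pvFA_set _ _ hplt]
      have hB : pvB_testStep (pvB_pos R) (ranks, ptr, act) v
          = (ranks ++ [some (((act.take (pvOcc R 0 v)[ptr.getD v 0]).count true : Int) + 1)],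
             ptr.insert v (ptr.getD v 0 + 1), act.set (pvOcc R 0 v)[ptr.getD v 0] false) := by
        rw [pvB_testStep]
        simp only [pvB_pos_getD]
        rw [dif_pos h]
      rw [hA, hB]
      exact ih _ _ _ (pv_inv_step R ptr act hInv v h)
    · have hnone : pvHit (pvFA act) R 0 v = none := by
        rw [hhit, List.getElem?_eq_none (by omega)]
      have hidx : PySem.List.index? (pvFilt (pvFA act) R 0) v = none := by
        rw [PySem.List.index?_eq_none_iff]
        exact pvHit_none _ _ _ _ hnone
      have hA : pvA_testStep (ranks, pvFilt (pvFA act) R 0) v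
          = (ranks ++ [none], pvFilt (pvFA act) R 0) := by
        rw [pvA_testStep]
        simp only [hidx]
      have hB : pvB_testStep (pvB_pos R) (ranks, ptr, act) v = (ranks ++ [none], ptr, act) := by
        rw [pvB_testStep]
        simp only [pvB_pos_getD]
        rw [dif_neg h]
      rw [hA, hB]
      exact ih _ _ _ hInv

theorem pv_inv_init (R : List Int) : pvInv R PySem.Dict.empty (List.replicate R.length true) := by
  refine ⟨by simp, ?_⟩
  intro v
  rw [PySem.Dict.getD_empty]
  refine ⟨Nat.zero_le _, ?_⟩
  intro j hj
  have hub : (pvOcc R 0 v)[j] < R.length := by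
    simpa using pvOcc_ub R 0 v _ (List.getElem_mem hj)
  simp [List.getD_eq_getElem?_getD, List.getElem?_replicate, hub]

theorem pv_filt_init (R : List Int) : pvFilt (pvFA (List.replicate R.length true)) R 0 = R := by
  apply pvFilt_all
  intro i _ hi
  simp only [Nat.zero_add] at hi
  simp [pvFA, List.getD_eq_getElem?_getD, List.getElem?_replicate, hi]

-- ===== VERDICT (by name: the statement is the Claim_ definition above) =====
theorem compute_normalized_ranks_spec : Claim_equal_compute_normalized_ranks := by
  intro train test R _
  unfold Spec_compute_normalized_ranks compute_normalized_ranks compute_normalized_ranks_alt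
  obtain ⟨hA, hI⟩ := pv_train_sim R train PySem.Dict.empty (List.replicate R.length true) (pv_inv_init R)
  rw [pv_filt_init R] at hA
  have h2 := pv_test_sim R test []
    (train.foldl (pvB_trainStep (pvB_pos R)) (PySem.Dict.empty, List.replicate R.length true)).1
    (train.foldl (pvB_trainStep (pvB_pos R)) (PySem.Dict.empty, List.replicate R.length true)).2 hI
  simp only [hA, h2]
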